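-- pv_equiv track=rewrite | github.com/Sudhir-Nishad/AI-lab-Code | Rabbit_leap.py | bfs_rabbit_leap
-- ===== SOURCE A (Python) =====
-- from collections import deque
--
-- def is_valid_state(state):
--     return True  # All states are valid in this problem
--
-- def swap_positions(state, i, j):
--     new_state = state[:]
--     new_state[i], new_state[j] = new_state[j], new_state[i]
--     return new_state
--
-- def get_next_states(state):
--     empty_index = state.index('_')
--     next_states = []
--
--     # Possible moves (left, right, jump)
--     moves = [-1, -2, 1, 2]
--
--     for move in moves:
--         new_index = empty_index + move
--         if 0 <= new_index < len(state):
--             # Swap the empty stone with the rabbit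
--             new_state = swap_positions(state, empty_index, new_index)
--             if is_valid_state(new_state):
--                 next_states.append(new_state)
--
--     return next_states
--
-- def bfs_rabbit_leap(initial_state, goal_state):
--     queue = deque([(initial_state, [])])  # (current state, path)
--     visited = set()
--     visited.add(tuple(initial_state))
--
--     while queue:
--         current_state, path = queue.popleft()
--
--         # Check if goal state is reached
--         if current_state == goal_state:
--             return path + [current_state]  # Return the solution path
--
--         # Get all next possible states
--         next_states = get_next_states(current_state)
--
--         for next_state in next_states:
--             if tuple(next_state) not in visited:
--                 visited.add(tuple(next_state))
--                 queue.append((next_state, path + [current_state]))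
--
--     return None  # No solution found
-- ===== SOURCE B (Python) =====
-- # BFS with a parent-pointer dict: reconstructs the path once at the goal
-- # instead of copying a path list for every enqueued node.
-- from collections import deque
--
-- def bfs_rabbit_leap(initial_state, goal_state):
--     start = tuple(initial_state)
--     parent = {start: None}
--     queue = deque([start])
--     while queue:
--         cur = queue.popleft()
--         if list(cur) == goal_state:
--             path = []
--             node = cur
--             while node is not None:
--                 path.append(list(node))
--                 node = parent[node]
--             path.reverse()
--             return path
--         i = cur.index('_')
--         for move in (-1, -2, 1, 2):
--             j = i + move
--             if 0 <= j < len(cur):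
--                 nxt = list(cur)
--                 nxt[i], nxt[j] = nxt[j], nxt[i]
--                 nxt = tuple(nxt)
--                 if nxt not in parent:
--                     parent[nxt] = cur
--                     queue.append(nxt)
--     return None
-- ===== Notes on version B (the rewrite author's own statement) =====
-- stated objective: alternative
-- what changed: B replaces A's per-node path copying (each enqueued state carries a full copy of its path) by a parent-pointer dict and a single back-to-front path reconstruction when the goal is dequeued.
import Mathlib
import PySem

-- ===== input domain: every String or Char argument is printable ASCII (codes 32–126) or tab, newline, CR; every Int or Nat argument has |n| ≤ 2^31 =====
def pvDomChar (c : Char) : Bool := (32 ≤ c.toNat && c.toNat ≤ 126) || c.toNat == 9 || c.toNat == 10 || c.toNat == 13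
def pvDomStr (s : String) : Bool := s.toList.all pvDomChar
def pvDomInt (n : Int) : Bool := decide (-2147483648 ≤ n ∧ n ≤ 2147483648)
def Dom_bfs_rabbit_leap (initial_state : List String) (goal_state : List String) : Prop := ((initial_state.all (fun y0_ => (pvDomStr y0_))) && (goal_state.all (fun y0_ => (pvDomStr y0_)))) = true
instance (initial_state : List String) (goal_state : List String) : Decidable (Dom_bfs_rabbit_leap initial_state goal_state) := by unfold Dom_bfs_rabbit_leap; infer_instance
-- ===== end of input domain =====

-- B replaces A's per-node path copying with a parent-pointer dict and a single path
-- reconstruction at the goal (objective: alternative). Equivalence is about return values.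

-- Both loops always terminate (visited states are permutations of the start state, a
-- finite set); the fuel below is a totalization bound never reached in practice.
def bfsFuel (initial_state : List String) : Nat := Nat.factorial initial_state.length + 2

-- ===== PORT A =====
def is_valid_state (_state : List String) : Bool := true

def swap_positions (state : List String) (i j : Nat) : List String :=
  (state.set i (state.getD j "")).set j (state.getD i "")

def get_next_states (state : List String) : List (List String) :=
  match PySem.List.index? state "_" with
  | none => []   -- Python raises ValueError here (no '_'); excluded by Pre_
  | some empty_index =>
      [(-1 : Int), -2, 1, 2].foldl (fun next_states move =>
        let new_index : Int := (empty_index : Int) + move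
        if 0 ≤ new_index ∧ new_index < state.length then
          (let new_state := swap_positions state empty_index new_index.toNat
           if is_valid_state new_state then next_states ++ [new_state] else next_states)
        else next_states) []

def bfsLoopA (goal : List String) :
    Nat → List (List String × List (List String)) → PySem.Set (List String) →
    Option (List (List String))
  | 0, _, _ => none            -- fuel guard (never reached)
  | _ + 1, [], _ => none
  | fuel + 1, (current, path) :: rest, visited =>
    if current = goal then some (path ++ [current])
    else
      let r := (get_next_states current).foldl
        (fun (qv : List (List String × List (List String)) × PySem.Set (List String)) n =>
          if qv.2.contains n then qv
          else (qv.1 ++ [(n, path ++ [current])], qv.2.add n)) (rest, visited)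
      bfsLoopA goal fuel r.1 r.2

def bfs_rabbit_leap (initial_state : List String) (goal_state : List String) :
    Option (List (List String)) :=
  bfsLoopA goal_state (bfsFuel initial_state) [(initial_state, [])]
    (PySem.Set.add PySem.Set.empty initial_state)

-- ===== PORT B =====
-- path reconstruction: follow parent pointers from the goal, then reverse
def reconstructB (parent : PySem.Dict (List String) (Option (List String))) :
    Nat → List String → List (List String) → List (List String)
  | 0, _, path => path.reverse  -- fuel guard (the parent chain is finite; never reached)
  | fuel + 1, node, path =>
    let path' := path ++ [node]
    match parent.get? node with
    | some (some prev) => reconstructB parent fuel prev path'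
    | _ => path'.reverse   -- some none: reached the start (Python's None sentinel)

def bfsLoopB (goal : List String) :
    Nat → List (List String) → PySem.Dict (List String) (Option (List String)) →
    Option (List (List String))
  | 0, _, _ => none            -- fuel guard (never reached)
  | _ + 1, [], _ => none
  | fuel + 1, cur :: rest, parent =>
    if cur = goal then some (reconstructB parent (parent.size + 1) cur [])
    else
      match PySem.List.index? cur "_" with
      | none => none   -- Python raises ValueError here (no '_'); excluded by Pre_
      | some i =>
        let r := [(-1 : Int), -2, 1, 2].foldl
          (fun (qp : List (List String) × PySem.Dict (List String) (Option (List String))) move =>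
            let j : Int := (i : Int) + move
            if 0 ≤ j ∧ j < cur.length then
              let nxt := (cur.set i (cur.getD j.toNat "")).set j.toNat (cur.getD i "")
              if qp.2.contains nxt then qp
              else (qp.1 ++ [nxt], qp.2.insert nxt (some cur))
            else qp) (rest, parent)
        bfsLoopB goal fuel r.1 r.2

def bfs_rabbit_leap_alt (initial_state : List String) (goal_state : List String) :
    Option (List (List String)) :=
  bfsLoopB goal_state (bfsFuel initial_state) [initial_state]
    (PySem.Dict.insert PySem.Dict.empty initial_state none)

-- ===== PRECONDITION & SPEC =====
-- Pre_ excludes the inputs where A raises ValueError: a start state with no '_' cell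
-- that is not already the goal (state.index('_') fails); B raises there too.
def Pre_bfs_rabbit_leap (initial_state : List String) (goal_state : List String) : Prop :=
  "_" ∈ initial_state ∨ initial_state = goal_state
instance (initial_state : List String) (goal_state : List String) : Decidable (Pre_bfs_rabbit_leap initial_state goal_state) := by unfold Pre_bfs_rabbit_leap; infer_instance

def pvWitness_bfs_rabbit_leap : List String × List String := (["R", "_", "L"], ["L", "_", "R"])

def Spec_bfs_rabbit_leap (initial_state : List String) (goal_state : List String) (out : Option (List (List String))) : Prop := out = bfs_rabbit_leap_alt initial_state goal_state
instance (initial_state : List String) (goal_state : List String) (out : Option (List (List String))) : Decidable (Spec_bfs_rabbit_leap initial_state goal_state out) := by unfold Spec_bfs_rabbit_leap; infer_instance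

-- ===== CLAIM (what is proved, stated in full; the proofs are below) =====
def Claim_equal_bfs_rabbit_leap : Prop := ∀ (initial_state : List String) (goal_state : List String), Dom_bfs_rabbit_leap initial_state goal_state → Pre_bfs_rabbit_leap initial_state goal_state → Spec_bfs_rabbit_leap initial_state goal_state (bfs_rabbit_leap initial_state goal_state)

-- ===== LEMMAS AND PROOFS =====

-- A's stored path, read off B's parent pointers: Spine parent s p holds when following
-- parents from s yields exactly the reverse of p ++ [s], ending at the start state.
inductive Spine (parent : PySem.Dict (List String) (Option (List String))) :
    List String → List (List String) → Prop
  | start : ∀ s, parent.get? s = some none → Spine parent s []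
  | step : ∀ s t p, parent.get? s = some (some t) → Spine parent t p → Spine parent s (p ++ [t])

lemma spine_reconstruct {parent : PySem.Dict (List String) (Option (List String))}
    {s : List String} {p : List (List String)} (h : Spine parent s p) :
    ∀ fuel, p.length < fuel → ∀ acc,
      reconstructB parent fuel s acc = (acc ++ (p ++ [s]).reverse).reverse := by
  induction h with
  | start s hs =>
    intro fuel hf acc
    match fuel, hf with
    | f + 1, _ => simp [reconstructB, hs]
  | step s t p hs _hsp ih =>
    intro fuel hf acc
    match fuel, hf with
    | f + 1, hf =>
      have hlt : p.length < f := by simp at hf; omega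
      simp [reconstructB, hs, ih f hlt (acc ++ [s])]

lemma spine_insert {parent : PySem.Dict (List String) (Option (List String))}
    {s : List String} {p : List (List String)} (h : Spine parent s p)
    (k : List String) (v : Option (List String)) (hk : parent.get? k = none) :
    Spine (parent.insert k v) s p := by
  induction h with
  | start s hs =>
    exact Spine.start s (by rw [PySem.Dict.get?_insert_of_ne _ _ (by intro e; rw [e, hk] at hs; cases hs)]; exact hs)
  | step s t p hs _hsp ih =>
    exact Spine.step s t p (by rw [PySem.Dict.get?_insert_of_ne _ _ (by intro e; rw [e, hk] at hs; cases hs)]; exact hs) ih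

-- the joint loop invariant
structure BfsInv (goal : List String) (qA : List (List String × List (List String)))
    (visited : PySem.Set (List String)) (qB : List (List String))
    (parent : PySem.Dict (List String) (Option (List String))) : Prop where
  queues : qB = qA.map Prod.fst
  mem : ∀ t, visited.contains t = parent.contains t
  spine : ∀ sp ∈ qA, Spine parent sp.1 sp.2
  lenlt : ∀ sp ∈ qA, sp.2.length < parent.size
  blank : ∀ sp ∈ qA, sp.1 = goal ∨ "_" ∈ sp.1

-- contains after Set.add of a fresh element
lemma set_contains_add (v : PySem.Set (List String)) (n t : List String)
    (h : v.contains n = false) :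
    (PySem.Set.add v n).contains t = (v.contains t || t == n) := by
  have hn : n ∉ v := fun hm => by
    rw [← PySem.Set.contains_iff] at hm; rw [h] at hm; exact Bool.false_ne_true hm
  simp only [PySem.Set.add_of_not_mem hn, PySem.Set.contains]
  by_cases ht : t = n <;> simp [ht]

-- folding over a conditionally-built list = one combined fold (relates A's two passes)
lemma foldl_built {α β : Type} (g : β → α → β) (cond : Int → Prop) [DecidablePred cond]
    (h : Int → α) :
    ∀ (moves : List Int) (pre : List α) (init : β),
      (moves.foldl (fun l m => if cond m then l ++ [h m] else l) pre).foldl g init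
        = moves.foldl (fun st m => if cond m then g st (h m) else st) (pre.foldl g init) := by
  intro moves
  induction moves with
  | nil => intro pre init; rfl
  | cons m ms ihm =>
    intro pre init
    simp only [List.foldl_cons]
    by_cases hc : cond m
    · rw [if_pos hc, if_pos hc, ihm, List.foldl_append, List.foldl_cons, List.foldl_nil]
    · rw [if_neg hc, if_neg hc, ihm]

-- joint invariant of the two successor folds
def JInv (goal s : List String) (p : List (List String))
    (accA : List (List String × List (List String)) × PySem.Set (List String))
    (accB : List (List String) × PySem.Dict (List String) (Option (List String))) : Prop :=
  accB.1 = accA.1.map Prod.fst ∧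
  (∀ t, accA.2.contains t = accB.2.contains t) ∧
  (∀ sp ∈ accA.1, Spine accB.2 sp.1 sp.2 ∧ sp.2.length < accB.2.size ∧ (sp.1 = goal ∨ "_" ∈ sp.1)) ∧
  Spine accB.2 s p ∧ p.length < accB.2.size

lemma fold_joint (goal s : List String) (p : List (List String)) (i : Nat)
    (hil : i < s.length) (hsi : s[i] = "_") :
    ∀ (moves : List Int) accA accB, JInv goal s p accA accB →
      JInv goal s p
        (moves.foldl (fun st m =>
            if 0 ≤ (i : Int) + m ∧ (i : Int) + m < s.length then
              (if st.2.contains (swap_positions s i ((i : Int) + m).toNat) then st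
               else (st.1 ++ [(swap_positions s i ((i : Int) + m).toNat, p ++ [s])],
                     st.2.add (swap_positions s i ((i : Int) + m).toNat)))
            else st) accA)
        (moves.foldl (fun qp m =>
            let j : Int := (i : Int) + m
            if 0 ≤ j ∧ j < s.length then
              let nxt := (s.set i (s.getD j.toNat "")).set j.toNat (s.getD i "")
              if qp.2.contains nxt then qp
              else (qp.1 ++ [nxt], qp.2.insert nxt (some s))
            else qp) accB) := by
  intro moves
  induction moves with
  | nil => intro accA accB h; exact h
  | cons m ms ihm =>
    intro accA accB h
    simp only [List.foldl_cons]
    apply ihm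
    by_cases hc : 0 ≤ (i : Int) + m ∧ (i : Int) + m < (s.length : Int)
    · simp only [if_pos hc]
      set j : Int := (i : Int) + m with hj
      set nxt := (s.set i (s.getD j.toNat "")).set j.toNat (s.getD i "") with hnxt
      have hswap : swap_positions s i j.toNat = nxt := rfl
      rw [hswap]
      obtain ⟨h1, h2, h3, h4, h5⟩ := h
      rw [h2 nxt]
      by_cases hmem : accB.2.contains nxt = true
      · simp only [if_pos hmem]; exact ⟨h1, h2, h3, h4, h5⟩
      · have hmem' : accB.2.contains nxt = false := by
          cases hcv : accB.2.contains nxt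
          · rfl
          · exact absurd hcv hmem
        have hget : accB.2.get? nxt = none := by
          rw [PySem.Dict.get?_eq_none_iff_contains]; exact hmem'
        have hsize : (accB.2.insert nxt (some s)).size = accB.2.size + 1 := by
          simp [PySem.Dict.size_insert, hmem']
        have hjlt : j.toNat < s.length := by omega
        have ha : s.getD i "" = "_" := by rw [List.getD_eq_getElem s "" hil, hsi]
        have hblanknxt : "_" ∈ nxt := by
          rw [hnxt]
          have hl : j.toNat < ((s.set i (s.getD j.toNat "")).set j.toNat (s.getD i "")).length := by
            simpa using hjlt
          have hv := List.getElem_set_self (l := s.set i (s.getD j.toNat ""))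
            (i := j.toNat) (a := s.getD i "") hl
          exact (hv.trans ha) ▸ List.getElem_mem hl
        simp only [if_neg hmem]
        refine ⟨by simp [h1], ?_, ?_, spine_insert h4 nxt (some s) hget,
          by simpa [hsize] using Nat.lt_succ_of_lt h5⟩
        · intro t
          rw [set_contains_add accA.2 nxt t (by rw [h2 nxt]; exact hmem'),
              PySem.Dict.contains_insert, h2 t, Bool.or_comm]
        · intro sp hsp
          rcases List.mem_append.mp hsp with hold | hnew
          · obtain ⟨hs1, hs2, hs3⟩ := h3 sp hold
            exact ⟨spine_insert hs1 nxt (some s) hget,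
              by simpa [hsize] using Nat.lt_succ_of_lt hs2, hs3⟩
          · rcases List.mem_singleton.mp hnew with rfl
            refine ⟨?_, by simp [hsize]; omega, Or.inr hblanknxt⟩
            exact Spine.step nxt s p (PySem.Dict.get?_insert_self _ _ _)
              (spine_insert h4 nxt (some s) hget)
    · simp only [if_neg hc]; exact h

lemma loop_eq (goal : List String) :
    ∀ (fuel : Nat) (qA : List (List String × List (List String)))
      (visited : PySem.Set (List String)) (qB : List (List String))
      (parent : PySem.Dict (List String) (Option (List String))),
      BfsInv goal qA visited qB parent →
      bfsLoopA goal fuel qA visited = bfsLoopB goal fuel qB parent := by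
  intro fuel
  induction fuel with
  | zero => intro qA v qB parent _; rfl
  | succ fuel ihf =>
    intro qA visited qB parent inv
    match qA, qB, inv.queues with
    | [], _, hq =>
      subst hq; rfl
    | (s, p) :: rest, _, hq =>
      subst hq
      by_cases hgoal : s = goal
      · have hsp := inv.spine (s, p) List.mem_cons_self
        have hlen := inv.lenlt (s, p) List.mem_cons_self
        simp only [bfsLoopA, bfsLoopB, List.map_cons, if_pos hgoal]
        rw [spine_reconstruct hsp (parent.size + 1) (by omega) []]
        simp
      · have hblank : "_" ∈ s := by
          rcases inv.blank (s, p) List.mem_cons_self with h | h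
          · exact absurd h hgoal
          · exact h
        have hsome : (PySem.List.index? s "_").isSome := by
          rw [PySem.List.index?_isSome_iff]; exact hblank
        obtain ⟨i, hidx⟩ := Option.isSome_iff_exists.mp hsome
        obtain ⟨hil, hsi, _⟩ := PySem.List.getElem_of_index?_eq_some hidx
        simp only [bfsLoopA, bfsLoopB, List.map_cons, if_neg hgoal, hidx,
          get_next_states, is_valid_state, if_true]
        rw [foldl_built
            (fun (qv : List (List String × List (List String)) × PySem.Set (List String)) n =>
              if qv.2.contains n then qv
              else (qv.1 ++ [(n, p ++ [s])], qv.2.add n))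
            (fun m => 0 ≤ (i : Int) + m ∧ (i : Int) + m < (s.length : Int))
            (fun m => swap_positions s i ((i : Int) + m).toNat)]
        simp only [List.foldl_nil]
        have hJ : JInv goal s p (rest, visited) (rest.map Prod.fst, parent) := by
          refine ⟨rfl, inv.mem, ?_,
            inv.spine (s, p) List.mem_cons_self, inv.lenlt (s, p) List.mem_cons_self⟩
          intro sp hsp
          exact ⟨inv.spine sp (List.mem_cons_of_mem _ hsp),
            inv.lenlt sp (List.mem_cons_of_mem _ hsp),
            inv.blank sp (List.mem_cons_of_mem _ hsp)⟩
        have hJr := fold_joint goal s p i hil hsi [(-1 : Int), -2, 1, 2]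
          (rest, visited) (rest.map Prod.fst, parent) hJ
        obtain ⟨j1, j2, j3, _, _⟩ := hJr
        apply ihf
        exact ⟨j1, j2, fun sp hsp => (j3 sp hsp).1, fun sp hsp => (j3 sp hsp).2.1,
          fun sp hsp => (j3 sp hsp).2.2⟩

-- ===== VERDICT (by name: the statement is the Claim_ definition above) =====
theorem bfs_rabbit_leap_spec : Claim_equal_bfs_rabbit_leap := by
  intro initial_state goal_state _dom hpre
  unfold Spec_bfs_rabbit_leap bfs_rabbit_leap bfs_rabbit_leap_alt
  apply loop_eq
  have hcontains : ∀ t, (PySem.Set.add PySem.Set.empty initial_state).contains t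
      = ((PySem.Dict.empty : PySem.Dict (List String) (Option (List String))).insert
          initial_state none).contains t := by
    intro t
    rw [set_contains_add PySem.Set.empty initial_state t
          (by simp [PySem.Set.contains, PySem.Set.empty]),
        PySem.Dict.contains_insert]
    simp [PySem.Set.contains, PySem.Set.empty, PySem.Dict.contains_empty, Bool.or_comm]
  refine ⟨rfl, hcontains, ?_, ?_, ?_⟩
  · intro sp hsp
    rcases List.mem_singleton.mp hsp with rfl
    exact Spine.start initial_state (PySem.Dict.get?_insert_self _ _ _)
  · intro sp hsp
    rcases List.mem_singleton.mp hsp with rfl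
    simp [PySem.Dict.size_insert, PySem.Dict.contains_empty, PySem.Dict.size_empty]
  · intro sp hsp
    rcases List.mem_singleton.mp hsp with rfl
    rcases hpre with h | h
    · exact Or.inr h
    · exact Or.inl h
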